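-- pv_equiv track=rewrite | github.com/utk09/open-appacademy-io | 1_IntroToProgramming/6_Advanced_Problems/20_pyramid_sum.py | pyramid_sum
-- ===== SOURCE A (Python) =====
-- def pyramid_sum(base):
--     final_arr = []
--     final_arr.append(base)
--     i = 0
--     while i < len(base) - 1:
--         x = adjacent_sum(base)
--         final_arr.append(x)
--         base = x
--     final_arr = final_arr[::-1]
--
--     return final_arr
--
-- def adjacent_sum(arr):
--     new_arr = []
--     for each_term in range(len(arr) - 1):
--         new_arr.append(arr[each_term] + arr[each_term + 1])
--     return new_arr
-- ===== SOURCE B (Python) =====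
-- def adjacent_sum(arr):
--     return [a + b for a, b in zip(arr, arr[1:])]
--
-- def pyramid_sum(base):
--     if len(base) <= 1:
--         return [base]
--     return pyramid_sum(adjacent_sum(base)) + [base]
-- ===== Notes on version B (the rewrite author's own statement) =====
-- stated objective: simpler
-- what changed: Replaced the iterative accumulate-then-reverse while loop (with its unused counter i) by a direct recursion that emits the smallest level first and appends the base last, and the index-based adjacent_sum by a zip of the list with its tail.
import Mathlib
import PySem

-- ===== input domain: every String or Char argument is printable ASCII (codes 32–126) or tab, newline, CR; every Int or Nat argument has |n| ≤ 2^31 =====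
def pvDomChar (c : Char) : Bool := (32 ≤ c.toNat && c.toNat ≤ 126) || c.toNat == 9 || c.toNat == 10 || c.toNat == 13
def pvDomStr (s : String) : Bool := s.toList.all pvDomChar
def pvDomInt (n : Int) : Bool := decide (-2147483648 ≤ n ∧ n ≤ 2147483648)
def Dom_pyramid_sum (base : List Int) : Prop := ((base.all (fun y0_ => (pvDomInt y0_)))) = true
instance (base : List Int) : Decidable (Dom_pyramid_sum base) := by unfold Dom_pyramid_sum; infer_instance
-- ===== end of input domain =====

-- B replaces A's accumulate-then-reverse while loop by a direct recursion appending the base last (objective: simpler).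

-- ===== PORT A =====
-- adjacent_sum: loop over range(len(arr)-1), arr[i] + arr[i+1]; indices are always in
-- range so getD is exact here.
def pvAdjacentSumA (arr : List Int) : List Int :=
  (List.range (arr.length - 1)).foldl
    (fun new_arr i => new_arr ++ [arr.getD i 0 + arr.getD (i + 1) 0]) []

theorem pvAdjacentSumA_len_lt (arr : List Int) (h : 1 < arr.length) :
    (pvAdjacentSumA arr).length < arr.length := by
  have : ∀ (l : List Nat) (acc : List Int),
      (l.foldl (fun new_arr i => new_arr ++ [arr.getD i 0 + arr.getD (i + 1) 0]) acc).length
        = acc.length + l.length := by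
    intro l
    induction l with
    | nil => intro acc; simp
    | cons a t ih => intro acc; rw [List.foldl_cons, ih]; simp; omega
  have h2 := this (List.range (arr.length - 1)) []
  unfold pvAdjacentSumA
  rw [h2]
  simp
  omega

-- while i < len(base) - 1: i stays 0, so the loop runs while len(base) > 1,
-- with base replaced by adjacent_sum(base) each iteration.
def pvLoopA (base : List Int) (final_arr : List (List Int)) : List (List Int) :=
  if _h : 1 < base.length then
    let x := pvAdjacentSumA base
    pvLoopA x (final_arr ++ [x])
  else final_arr
termination_by base.length
decreasing_by exact pvAdjacentSumA_len_lt base _h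

def pyramid_sum (base : List Int) : List (List Int) :=
  (pvLoopA base [base]).reverse

-- ===== PORT B =====
-- [a + b for a, b in zip(arr, arr[1:])]
def pvAdjacentSumB (arr : List Int) : List Int :=
  List.zipWith (· + ·) arr (arr.drop 1)

theorem pvAdjacentSumB_len_lt (arr : List Int) (h : 1 < arr.length) :
    (pvAdjacentSumB arr).length < arr.length := by
  simp [pvAdjacentSumB]
  omega

def pyramid_sum_alt (base : List Int) : List (List Int) :=
  if _h : base.length ≤ 1 then [base]
  else pyramid_sum_alt (pvAdjacentSumB base) ++ [base]
termination_by base.length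
decreasing_by exact pvAdjacentSumB_len_lt base (by omega)

-- ===== PRECONDITION & SPEC =====
def Spec_pyramid_sum (base : List Int) (out : List (List Int)) : Prop := out = pyramid_sum_alt base
instance (base : List Int) (out : List (List Int)) : Decidable (Spec_pyramid_sum base out) := by unfold Spec_pyramid_sum; infer_instance

-- ===== CLAIM (what is proved, stated in full; the proofs are below) =====
def Claim_equal_pyramid_sum : Prop := ∀ (base : List Int), Dom_pyramid_sum base → Spec_pyramid_sum base (pyramid_sum base)

-- ===== LEMMAS AND PROOFS =====

-- the two adjacent_sum helpers agree
theorem pvAdjacentSum_eq (arr : List Int) : pvAdjacentSumA arr = pvAdjacentSumB arr := by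
  have key : ∀ (n : Nat) (acc : List Int), n + 1 ≤ arr.length →
      (List.range n).foldl
        (fun new_arr i => new_arr ++ [arr.getD i 0 + arr.getD (i + 1) 0]) acc
      = acc ++ (List.zipWith (· + ·) arr (arr.drop 1)).take n := by
    intro n
    induction n with
    | zero => intro acc _; simp
    | succ m ih =>
      intro acc hm
      rw [List.range_succ, List.foldl_append, ih acc (by omega)]
      have hlen : (List.zipWith (· + ·) arr (arr.drop 1)).length = arr.length - 1 := by
        simp
      have hm' : m < (List.zipWith (· + ·) arr (arr.drop 1)).length := by omega
      have hget : (List.zipWith (· + ·) arr (arr.drop 1))[m]'hm'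
          = arr.getD m 0 + arr.getD (m + 1) 0 := by
        have h1 : m < arr.length := by omega
        have h2 : m + 1 < arr.length := by omega
        simp [List.getElem_zipWith, List.getD, List.getElem?_eq_getElem h1,
          List.getElem?_eq_getElem h2]
      rw [List.foldl_cons, List.foldl_nil, List.take_add_one,
        List.getElem?_eq_getElem hm', hget]
      simp
  unfold pvAdjacentSumA pvAdjacentSumB
  rcases Nat.eq_zero_or_pos arr.length with h0 | h0
  · simp [List.eq_nil_of_length_eq_zero h0]
  · have := key (arr.length - 1) [] (by omega)
    rw [this]
    simp

-- the loop of A, reversed, is B's recursion with the accumulator's reverse appended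
theorem pvLoop_eq (n : Nat) : ∀ (base : List Int) (acc : List (List Int)),
    base.length ≤ n →
    (pvLoopA base (acc ++ [base])).reverse = pyramid_sum_alt base ++ acc.reverse := by
  induction n with
  | zero =>
    intro base acc h
    have hb : base = [] := List.eq_nil_of_length_eq_zero (by omega)
    subst hb
    rw [pvLoopA, pyramid_sum_alt]
    simp
  | succ m ih =>
    intro base acc h
    rw [pvLoopA, pyramid_sum_alt]
    by_cases h1 : 1 < base.length
    · simp only [dif_pos h1, dif_neg (by omega : ¬ base.length ≤ 1)]
      have hlen : (pvAdjacentSumA base).length ≤ m := by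
        have := pvAdjacentSumA_len_lt base h1; omega
      have := ih (pvAdjacentSumA base) (acc ++ [base])
        (by omega)
      rw [show acc ++ [base] ++ [pvAdjacentSumA base]
            = (acc ++ [base]) ++ [pvAdjacentSumA base] by simp] at *
      rw [this, pvAdjacentSum_eq]
      simp
    · simp [dif_neg h1, dif_pos (by omega : base.length ≤ 1)]

-- ===== VERDICT (by name: the statement is the Claim_ definition above) =====
theorem pyramid_sum_spec : Claim_equal_pyramid_sum := by
  intro base _
  unfold Spec_pyramid_sum pyramid_sum
  have := pvLoop_eq base.length base [] (le_refl _)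
  simpa using this
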